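-- pv_equiv track=rewrite | github.com/nikunjpanchal22/code_clone_classification | python_t1_t2_full/Gpt_false_pair_3800.py | get_most_ooo_word
-- ===== SOURCE A (Python) =====
-- def get_most_ooo_word(lines):
-- 	most_o = []
-- 	max_o_count = -1
-- 	for line in lines:
-- 		phrase_words = line.split(" ")
-- 		for word in phrase_words:
-- 			o_count = word.count("o")
-- 			if o_count > max_o_count:
-- 				max_o_count = o_count
-- 				most_o = [word]
-- 			elif o_count == max_o_count:
-- 				most_o.append(word)
-- 	return most_o
-- ===== SOURCE B (Python) =====
-- def get_most_ooo_word(lines):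
--     words = [w for line in lines for w in line.split(" ")]
--     if not words:
--         return []
--     max_o_count = max(w.count("o") for w in words)
--     return [w for w in words if w.count("o") == max_o_count]
-- ===== Notes on version B (the rewrite author's own statement) =====
-- stated objective: simpler
-- what changed: Replaces the fused single-pass max-tracking/reset-and-append loop over lines-of-words with a build-then-two-scan decomposition: flatten all words, take the maximum 'o'-count, then filter the words with that count.
import Mathlib
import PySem

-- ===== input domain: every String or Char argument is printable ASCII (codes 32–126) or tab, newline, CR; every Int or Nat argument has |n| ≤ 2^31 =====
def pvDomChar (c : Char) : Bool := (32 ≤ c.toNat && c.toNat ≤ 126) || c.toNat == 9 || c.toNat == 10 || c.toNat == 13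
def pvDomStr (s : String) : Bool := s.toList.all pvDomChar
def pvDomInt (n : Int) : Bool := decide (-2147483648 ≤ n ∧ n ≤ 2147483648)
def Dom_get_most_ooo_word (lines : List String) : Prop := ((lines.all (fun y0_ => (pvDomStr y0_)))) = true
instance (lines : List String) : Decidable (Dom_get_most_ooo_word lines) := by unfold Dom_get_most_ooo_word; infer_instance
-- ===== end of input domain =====

-- B replaces A's fused max-tracking/reset-and-append loop by a flatten-then-max-then-filter decomposition (objective: simpler).


-- shared primitive wrappers (exact: sep " " is nonempty, so split? is always `some`)
def pvSplit (line : String) : List String := (PySem.Str.split? line " ").getD []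
def pvC (w : String) : Int := (PySem.Str.count w "o" : Int)

-- ===== PORT A =====
-- the loop body of A: running state (most_o, max_o_count)
def pvStepA (s : List String × Int) (word : String) : List String × Int :=
  let o_count : Int := pvC word
  if o_count > s.2 then ([word], o_count)
  else if o_count == s.2 then (s.1 ++ [word], s.2)
  else s

def get_most_ooo_word (lines : List String) : List String :=
  (lines.foldl (fun s line => (pvSplit line).foldl pvStepA s)
    (([], -1) : List String × Int)).1

-- ===== PORT B =====
def get_most_ooo_word_alt (lines : List String) : List String :=
  let words := lines.flatMap pvSplit
  match words with
  | [] => []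
  | w :: ws =>
    let max_o_count : Int := ws.foldl (fun acc x => max acc (pvC x)) (pvC w)
    words.filter (fun x => (pvC x == max_o_count))

-- ===== PRECONDITION & SPEC =====
def Spec_get_most_ooo_word (lines : List String) (out : List String) : Prop := out = get_most_ooo_word_alt lines
instance (lines : List String) (out : List String) : Decidable (Spec_get_most_ooo_word lines out) := by unfold Spec_get_most_ooo_word; infer_instance

-- ===== CLAIM (what is proved, stated in full; the proofs are below) =====
def Claim_equal_get_most_ooo_word : Prop := ∀ (lines : List String), Dom_get_most_ooo_word lines → Spec_get_most_ooo_word lines (get_most_ooo_word lines)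

-- ===== LEMMAS AND PROOFS =====

theorem pvC_nonneg (w : String) : 0 ≤ pvC w := Int.natCast_nonneg _

-- A's nested loop over lines-of-words is the same fold over the flattened word list
theorem pvFoldA_flatten (lines : List String) (s : List String × Int) :
    lines.foldl (fun s line => (pvSplit line).foldl pvStepA s) s
      = (lines.flatMap pvSplit).foldl pvStepA s := by
  induction lines generalizing s with
  | nil => rfl
  | cons l t ih => simp only [List.foldl_cons, List.flatMap_cons, List.foldl_append, ih]

-- invariant of A's fused loop: the final max is the running max of the counts, and the
-- collected list is the in-order filter of the words attaining it (prefixed by the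
-- incoming accumulator exactly when the max did not move)
theorem pvStepA_inv (ws : List String) (acc : List String) (mx : Int) :
    ws.foldl pvStepA (acc, mx)
      = ((if ws.foldl (fun m w => max m (pvC w)) mx = mx then acc else [])
          ++ ws.filter (fun w => (pvC w == ws.foldl (fun m w => max m (pvC w)) mx)),
         ws.foldl (fun m w => max m (pvC w)) mx) := by
  induction ws generalizing acc mx with
  | nil => simp
  | cons w t ih =>
    have hge := (PySem.List.le_foldl_max_int t pvC (max mx (pvC w))).1
    simp only [List.foldl_cons, List.filter_cons]
    by_cases h1 : pvC w > mx
    · have hm : max mx (pvC w) = pvC w := by omega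
      rw [show pvStepA (acc, mx) w = ([w], pvC w) from by simp [pvStepA, h1]]
      rw [ih]
      simp only [hm] at hge ⊢
      have hne : t.foldl (fun m w => max m (pvC w)) (pvC w) ≠ mx := by omega
      rw [if_neg hne]
      by_cases h2 : t.foldl (fun m w => max m (pvC w)) (pvC w) = pvC w
      · simp [h2]
      · have hb : (pvC w == t.foldl (fun m w => max m (pvC w)) (pvC w)) = false := by
          rw [beq_eq_false_iff_ne]; omega
        rw [if_neg h2]
        simp [hb]
    · by_cases h2 : pvC w = mx
      · have hm : max mx (pvC w) = mx := by omega
        rw [show pvStepA (acc, mx) w = (acc ++ [w], mx) from by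
          simp only [pvStepA, h2]; rw [if_neg (by omega), if_pos (by simp)]]
        rw [ih]
        simp only [hm] at hge ⊢
        by_cases h3 : t.foldl (fun m w => max m (pvC w)) mx = mx
        · have hb : (pvC w == t.foldl (fun m w => max m (pvC w)) mx) = true := by
            rw [beq_iff_eq]; omega
          rw [if_pos h3, if_pos h3]
          simp [hb]
        · have hb : (pvC w == t.foldl (fun m w => max m (pvC w)) mx) = false := by
            rw [beq_eq_false_iff_ne]; omega
          rw [if_neg h3, if_neg h3]
          simp [hb]
      · have hlt : pvC w < mx := by omega
        have hm : max mx (pvC w) = mx := by omega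
        rw [show pvStepA (acc, mx) w = (acc, mx) from by
          simp only [pvStepA]; rw [if_neg (by omega), if_neg (by simp; omega)]]
        rw [ih]
        simp only [hm] at hge ⊢
        have hb : (pvC w == t.foldl (fun m w => max m (pvC w)) mx) = false := by
          rw [beq_eq_false_iff_ne]; omega
        simp [hb]

-- ===== VERDICT (by name: the statement is the Claim_ definition above) =====
theorem get_most_ooo_word_spec : Claim_equal_get_most_ooo_word := by
  intro lines _
  show get_most_ooo_word lines = get_most_ooo_word_alt lines
  unfold get_most_ooo_word get_most_ooo_word_alt
  rw [pvFoldA_flatten]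
  cases h : lines.flatMap pvSplit with
  | nil => simp
  | cons w ws =>
    rw [pvStepA_inv]
    simp only [List.foldl_cons]
    have h0 : max (-1 : Int) (pvC w) = pvC w := by
      have := pvC_nonneg w; omega
    simp only [h0]
    by_cases h1 : ws.foldl (fun m w => max m (pvC w)) (pvC w) = -1
    · rw [if_pos h1]
      have hge := (PySem.List.le_foldl_max_int ws pvC (pvC w)).1
      have := pvC_nonneg w; omega
    · rw [if_neg h1]
      rfl
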